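-- pv_equiv track=rewrite | github.com/yurunsang/penguin-love-judge | app.py | split_overall_and_reason
-- ===== SOURCE A (Python) =====
-- def split_overall_and_reason(responsibility_section: str):
--     """Split out the 'Overall split: ...' line and keep the rest as reasoning text."""
--     if not responsibility_section:
--         return "", responsibility_section
--
--     lines = responsibility_section.splitlines()
--     overall_line = ""
--     remaining_lines = []
--     for line in lines:
--         if "Overall split" in line and not overall_line:
--             overall_line = line.lstrip("-").strip()
--         else:
--             remaining_lines.append(line)
--     remaining_text = "\n".join(remaining_lines).strip()
--     return overall_line, remaining_text
-- ===== SOURCE B (Python) =====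
-- def split_overall_and_reason(responsibility_section: str):
--     """Split out the 'Overall split: ...' line and keep the rest as reasoning text."""
--     if not responsibility_section:
--         return "", responsibility_section
--
--     lines = responsibility_section.splitlines()
--     idx = next((i for i, l in enumerate(lines) if "Overall split" in l), None)
--     if idx is None:
--         return "", "\n".join(lines).strip()
--     overall = lines[idx].lstrip("-").strip()
--     remaining = "\n".join(lines[:idx] + lines[idx + 1:]).strip()
--     return overall, remaining
-- ===== Notes on version B (the rewrite author's own statement) =====
-- stated objective: simpler
-- what changed: Replaces A's flag-carrying accumulator loop (first-match flag plus remaining-lines list) with a direct first-index search followed by slicing the matched line out.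
import Mathlib
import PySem

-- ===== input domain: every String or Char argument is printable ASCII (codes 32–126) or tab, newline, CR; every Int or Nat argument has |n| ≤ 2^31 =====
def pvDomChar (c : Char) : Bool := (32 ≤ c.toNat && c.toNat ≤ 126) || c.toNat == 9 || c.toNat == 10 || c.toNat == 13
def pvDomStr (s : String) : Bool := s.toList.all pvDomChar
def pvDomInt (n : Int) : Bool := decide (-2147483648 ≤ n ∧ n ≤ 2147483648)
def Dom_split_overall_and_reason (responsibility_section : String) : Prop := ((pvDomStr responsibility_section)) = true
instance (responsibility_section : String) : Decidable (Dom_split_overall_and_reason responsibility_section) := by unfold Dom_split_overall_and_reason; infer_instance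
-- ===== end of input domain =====

-- B replaces A's flag-carrying accumulator loop by a first-index search plus slicing the matched line out (simpler decomposition; return value only, no mutation).


-- ===== PORT A =====
-- line.lstrip("-").strip(); lstrip with the single strip char '-' is exactly dropWhile (· == '-')
def stripOverall (line : String) : String :=
  PySem.Str.strip (String.ofList (line.toList.dropWhile (fun c => c == '-')))

-- the body of A's for-loop, named so the fold can cite it
def stepA (acc : String × List String) (line : String) : String × List String :=
  if PySem.Str.isIn "Overall split" line && acc.1 == "" then
    (stripOverall line, acc.2)
  else
    (acc.1, acc.2 ++ [line])

def split_overall_and_reason (responsibility_section : String) : String × String :=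
  if responsibility_section = "" then ("", responsibility_section)
  else
    let lines := PySem.Str.splitlines responsibility_section
    let r := lines.foldl stepA ("", [])
    (r.1, PySem.Str.strip (PySem.Str.join "\n" r.2))

-- ===== PORT B =====
-- next((i for i,l in enumerate(lines) if "Overall split" in l), None) is List.findIdx?;
-- lines[:idx] + lines[idx+1:] with idx a valid nonnegative index is take idx ++ drop (idx+1)
def split_overall_and_reason_alt (responsibility_section : String) : String × String :=
  if responsibility_section = "" then ("", responsibility_section)
  else
    let lines := PySem.Str.splitlines responsibility_section
    match lines.findIdx? (fun l => PySem.Str.isIn "Overall split" l) with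
    | none => ("", PySem.Str.strip (PySem.Str.join "\n" lines))
    | some i =>
        (stripOverall (lines.getD i ""),
         PySem.Str.strip (PySem.Str.join "\n" (lines.take i ++ lines.drop (i + 1))))

-- ===== PRECONDITION & SPEC =====
def Spec_split_overall_and_reason (responsibility_section : String) (out : String × String) : Prop := out = split_overall_and_reason_alt responsibility_section
instance (responsibility_section : String) (out : String × String) : Decidable (Spec_split_overall_and_reason responsibility_section out) := by unfold Spec_split_overall_and_reason; infer_instance

-- ===== CLAIM (what is proved, stated in full; the proofs are below) =====
def Claim_equal_split_overall_and_reason : Prop := ∀ (responsibility_section : String), Dom_split_overall_and_reason responsibility_section → Spec_split_overall_and_reason responsibility_section (split_overall_and_reason responsibility_section)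

-- ===== LEMMAS AND PROOFS =====

theorem mem_dropWhile_of_mem {α : Type} {p : α → Bool} {x : α} {l : List α}
    (hx : x ∈ l) (hpx : p x = false) : x ∈ l.dropWhile p := by
  have h := (List.takeWhile_append_dropWhile (p := p) (l := l))
  rw [← h] at hx
  rcases List.mem_append.mp hx with h1 | h2
  · have := List.mem_takeWhile_imp h1
    simp [hpx] at this
  · exact h2

theorem strip_ne_nil_of_mem {x : Char} {l : List Char}
    (hx : x ∈ l) (hs : PySem.Chars.isspace x = false) : PySem.Chars.strip l ≠ [] := by
  have h1 : x ∈ PySem.Chars.lstrip l := mem_dropWhile_of_mem hx hs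
  have h2 : x ∈ PySem.Chars.rstrip (PySem.Chars.lstrip l) := by
    unfold PySem.Chars.rstrip
    exact List.mem_reverse.mpr (mem_dropWhile_of_mem (List.mem_reverse.mpr h1) hs)
  intro hnil
  rw [PySem.Chars.strip] at hnil
  simp [hnil] at h2

theorem stripOverall_ne_empty {line : String}
    (h : PySem.Str.isIn "Overall split" line = true) : stripOverall line ≠ "" := by
  have hinf : "Overall split".toList <:+: line.toList :=
    (PySem.Chars.isIn_iff_infix _ _).mp (by simpa using h)
  have hO : 'O' ∈ line.toList := hinf.subset (by decide)
  have hO' : 'O' ∈ line.toList.dropWhile (fun c => c == '-') :=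
    mem_dropWhile_of_mem hO (by decide)
  have hne : PySem.Chars.strip (line.toList.dropWhile (fun c => c == '-')) ≠ [] :=
    strip_ne_nil_of_mem hO' (by decide)
  intro hc
  apply hne
  have := congrArg String.toList hc
  simpa [stripOverall, PySem.Str.strip] using this

theorem foldl_stepA_found (rest : List String) (o : String) (acc : List String) (ho : o ≠ "") :
    rest.foldl stepA (o, acc) = (o, acc ++ rest) := by
  induction rest generalizing acc with
  | nil => simp
  | cons l rs ih =>
      have : (o == "") = false := by simpa using ho
      simp [stepA, this, ih]

theorem foldl_stepA_eq (lines : List String) (acc : List String) :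
    lines.foldl stepA ("", acc) =
      match lines.findIdx? (fun l => PySem.Str.isIn "Overall split" l) with
      | none => ("", acc ++ lines)
      | some i => (stripOverall (lines.getD i ""), acc ++ (lines.take i ++ lines.drop (i + 1))) := by
  induction lines generalizing acc with
  | nil => simp
  | cons l rs ih =>
      by_cases hp : PySem.Str.isIn "Overall split" l = true
      · have hne : stripOverall l ≠ "" := stripOverall_ne_empty hp
        have hpC : PySem.Chars.isIn "Overall split".toList l.toList = true := by
          simpa [PySem.Str.isIn_eq] using hp
        rw [show "Overall split".toList = ['O','v','e','r','a','l','l',' ','s','p','l','i','t'] from rfl] at hpC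
        rw [List.foldl_cons, show stepA ("", acc) l = (stripOverall l, acc) by
          simp [stepA, hpC]]
        rw [foldl_stepA_found rs (stripOverall l) acc hne]
        simp [List.findIdx?_cons, hpC]
      · have hp' : PySem.Str.isIn "Overall split" l = false := by simpa using hp
        have hpC : PySem.Chars.isIn "Overall split".toList l.toList = false := by
          simpa [PySem.Str.isIn_eq] using hp'
        rw [show "Overall split".toList = ['O','v','e','r','a','l','l',' ','s','p','l','i','t'] from rfl] at hpC
        rw [List.foldl_cons, show stepA ("", acc) l = ("", acc ++ [l]) by
          simp [stepA, hpC]]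
        rw [ih (acc ++ [l])]
        cases hfi : rs.findIdx? (fun l => PySem.Str.isIn "Overall split" l) with
        | none =>
            have hfiC := hfi
            simp only [PySem.Str.isIn_eq] at hfiC
            rw [show "Overall split".toList = ['O','v','e','r','a','l','l',' ','s','p','l','i','t'] from rfl] at hfiC
            simp [List.findIdx?_cons, hpC, hfiC]
        | some i =>
            have hfiC := hfi
            simp only [PySem.Str.isIn_eq] at hfiC
            rw [show "Overall split".toList = ['O','v','e','r','a','l','l',' ','s','p','l','i','t'] from rfl] at hfiC
            simp [List.findIdx?_cons, hpC, hfiC, List.take_succ_cons]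

-- ===== VERDICT (by name: the statement is the Claim_ definition above) =====
theorem split_overall_and_reason_spec : Claim_equal_split_overall_and_reason := by
  intro s _
  unfold Spec_split_overall_and_reason split_overall_and_reason split_overall_and_reason_alt
  by_cases hs : s = ""
  · simp [hs]
  · simp only [if_neg hs]
    rw [foldl_stepA_eq (PySem.Str.splitlines s) []]
    cases (PySem.Str.splitlines s).findIdx? (fun l => PySem.Str.isIn "Overall split" l) with
    | none => simp
    | some i => simp
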